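-- pv_equiv track=rewrite | github.com/ledig11/ledig | backend/app/api/analyze.py | parse_actionable_summary_metrics
-- ===== SOURCE A (Python) =====
-- from typing import Optional
--
-- def parse_actionable_summary_metrics(actionable_summary: str) -> dict[str, Optional[int]]:
--     result: dict[str, Optional[int]] = {
--         "candidate_count": None,
--         "scanned_nodes": None,
--         "scan_depth": None,
--     }
--     if not actionable_summary:
--         return result
--
--     for raw_part in actionable_summary.split(";"):
--         part = raw_part.strip()
--         if "=" not in part:
--             continue
--
--         key, value = part.split("=", 1)
--         normalized_key = key.strip().casefold()
--         normalized_value = value.strip()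
--         if not normalized_value:
--             continue
--
--         try:
--             parsed_value = int(normalized_value)
--         except ValueError:
--             continue
--
--         if normalized_key == "candidate_count":
--             result["candidate_count"] = parsed_value
--         elif normalized_key == "scanned_nodes":
--             result["scanned_nodes"] = parsed_value
--         elif normalized_key == "scan_depth":
--             result["scan_depth"] = parsed_value
--
--     return result
-- ===== SOURCE B (Python) =====
-- _METRIC_KEYS = ("candidate_count", "scanned_nodes", "scan_depth")
--
--
-- def parse_actionable_summary_metrics(actionable_summary: str):
--     # Per-key backward search: the last valid assignment in the summary is the
--     # first valid one when the parts are scanned in reverse, so each metric is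
--     # found independently with an early return -- no accumulating dict at all.
--     parts = actionable_summary.split(";")
--
--     def last_value(target):
--         for raw_part in reversed(parts):
--             part = raw_part.strip()
--             if "=" not in part:
--                 continue
--             key, value = part.split("=", 1)
--             if key.strip().casefold() != target:
--                 continue
--             value = value.strip()
--             if not value:
--                 continue
--             try:
--                 return int(value)
--             except ValueError:
--                 continue
--         return None
--
--     return {k: last_value(k) for k in _METRIC_KEYS}
-- ===== Notes on version B (the rewrite author's own statement) =====
-- stated objective: alternative
-- what changed: B replaces A's forward fold that mutates a preset three-key dict via if/elif routing by three independent backward searches: for each metric key it scans the parts in reverse and returns the first valid value (= A's last-write-wins), using no dict at all.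
import Mathlib
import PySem

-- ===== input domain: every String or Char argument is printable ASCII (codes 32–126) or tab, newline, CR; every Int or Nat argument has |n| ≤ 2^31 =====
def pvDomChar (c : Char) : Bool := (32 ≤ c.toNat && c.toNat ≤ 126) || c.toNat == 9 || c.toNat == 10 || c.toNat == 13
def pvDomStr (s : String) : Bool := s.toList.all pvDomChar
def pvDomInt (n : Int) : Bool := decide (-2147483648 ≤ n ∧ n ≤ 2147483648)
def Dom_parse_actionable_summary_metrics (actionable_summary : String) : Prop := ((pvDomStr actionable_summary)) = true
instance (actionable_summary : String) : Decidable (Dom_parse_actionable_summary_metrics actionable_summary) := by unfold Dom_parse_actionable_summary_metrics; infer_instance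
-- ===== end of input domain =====

-- B replaces A's forward fold over a preset three-key dict by three independent backward
-- searches (first valid value scanning the parts in reverse = A's last-write-wins); objective:
-- alternative decomposition, same cost.


-- ===== PORT A =====
-- A's loop body for one raw part; `casefold` equals `lower` on the ASCII domain these theorems
-- cover; `split("=", 1)` always yields exactly two pieces when "=" is in part (the `_ => d`
-- match arms are unreachable totality defaults, not logic).
def pvStepA (d : PySem.Dict String (Option Int)) (raw_part : String) :
    PySem.Dict String (Option Int) :=
  let part := PySem.Str.strip raw_part
  if PySem.Str.isIn "=" part then
    match PySem.Str.splitMax? part "=" 1 with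
    | some [key, value] =>
      let normalized_key := PySem.Str.lower (PySem.Str.strip key)
      let normalized_value := PySem.Str.strip value
      if normalized_value = "" then d
      else
        match PySem.Int.ofStr? normalized_value with
        | none => d
        | some parsed_value =>
          if normalized_key = "candidate_count" then d.insert "candidate_count" (some parsed_value)
          else if normalized_key = "scanned_nodes" then d.insert "scanned_nodes" (some parsed_value)
          else if normalized_key = "scan_depth" then d.insert "scan_depth" (some parsed_value)
          else d
    | _ => d
  else d

-- `.getD []` on split? is a totality default only: split? is none only for an empty separator.
def parse_actionable_summary_metrics (actionable_summary : String) : List (String × Option Int) :=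
  let result : PySem.Dict String (Option Int) :=
    PySem.Dict.ofList [("candidate_count", none), ("scanned_nodes", none), ("scan_depth", none)]
  if actionable_summary = "" then result.items
  else
    (((PySem.Str.split? actionable_summary ";").getD []).foldl pvStepA result).items

-- ===== PORT B =====
def pvMetricKeys : List String := ["candidate_count", "scanned_nodes", "scan_depth"]

-- B's per-part attempt: the value this part assigns to `target`, if any (casefold = lower on
-- the ASCII domain; the `_ => none` match arms are unreachable totality defaults as in port A).
def pvTryB (target raw_part : String) : Option Int :=
  let part := PySem.Str.strip raw_part
  if PySem.Str.isIn "=" part then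
    match PySem.Str.splitMax? part "=" 1 with
    | some [key, value] =>
      if PySem.Str.lower (PySem.Str.strip key) ≠ target then none
      else
        let value' := PySem.Str.strip value
        if value' = "" then none else PySem.Int.ofStr? value'
    | _ => none
  else none

-- B's `for raw_part in reversed(parts): ... return ...` loop: first hit wins, else None.
def pvFirst (target : String) : List String → Option Int
  | [] => none
  | raw :: rest =>
    match pvTryB target raw with
    | some v => some v
    | none => pvFirst target rest

def parse_actionable_summary_metrics_alt (actionable_summary : String) : List (String × Option Int) :=
  let parts := (PySem.Str.split? actionable_summary ";").getD []
  pvMetricKeys.map (fun k => (k, pvFirst k parts.reverse))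

-- ===== PRECONDITION & SPEC =====
def Spec_parse_actionable_summary_metrics (actionable_summary : String) (out : List (String × Option Int)) : Prop := out = parse_actionable_summary_metrics_alt actionable_summary
instance (actionable_summary : String) (out : List (String × Option Int)) : Decidable (Spec_parse_actionable_summary_metrics actionable_summary out) := by unfold Spec_parse_actionable_summary_metrics; infer_instance

-- ===== CLAIM (what is proved, stated in full; the proofs are below) =====
def Claim_equal_parse_actionable_summary_metrics : Prop := ∀ (actionable_summary : String), Dom_parse_actionable_summary_metrics actionable_summary → Spec_parse_actionable_summary_metrics actionable_summary (parse_actionable_summary_metrics actionable_summary)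

-- ===== LEMMAS AND PROOFS =====

-- the shape A's dict keeps throughout the loop: the three keys in order, values given by f
def pvShape (f : String → Option Int) : PySem.Dict String (Option Int) :=
  PySem.Dict.mk [("candidate_count", f "candidate_count"), ("scanned_nodes", f "scanned_nodes"),
    ("scan_depth", f "scan_depth")]

lemma pvShape_congr {f g : String → Option Int}
    (h : ∀ k ∈ pvMetricKeys, f k = g k) : pvShape f = pvShape g := by
  unfold pvShape
  rw [h "candidate_count" (by simp [pvMetricKeys]), h "scanned_nodes" (by simp [pvMetricKeys]),
    h "scan_depth" (by simp [pvMetricKeys])]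

lemma pvStep_shape (f : String → Option Int) (raw : String) :
    pvStepA (pvShape f) raw
      = pvShape (fun k => match pvTryB k raw with | some v => some v | none => f k) := by
  unfold pvStepA pvTryB
  by_cases hin : PySem.Str.isIn "=" (PySem.Str.strip raw) = true
  · rw [if_pos hin]
    simp only [if_pos hin]
    cases hsp : PySem.Str.splitMax? (PySem.Str.strip raw) "=" 1 with
    | none => rfl
    | some ls =>
      match ls with
      | [] => rfl
      | [_] => rfl
      | _ :: _ :: _ :: _ => rfl
      | [key, value] =>
        by_cases hv : PySem.Str.strip value = ""
        · simp only [hv, if_true]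
          apply pvShape_congr
          intro k _
          by_cases hk : PySem.Str.lower (PySem.Str.strip key) ≠ k <;> simp [hk]
        · simp only [if_neg hv]
          cases hof : PySem.Int.ofStr? (PySem.Str.strip value) with
          | none =>
            apply Eq.symm
            apply pvShape_congr
            intro k _
            by_cases hk : PySem.Str.lower (PySem.Str.strip key) ≠ k <;> simp [hk]
          | some v =>
            dsimp only
            generalize PySem.Str.lower (PySem.Str.strip key) = nk
            by_cases h1 : nk = "candidate_count"
            · rw [if_pos h1]
              subst h1
              apply PySem.Dict.ext
              rw [PySem.Dict.items_insert_of_contains]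
              · simp [pvShape]
              · simp [pvShape]
            · rw [if_neg h1]
              by_cases h2 : nk = "scanned_nodes"
              · rw [if_pos h2]
                subst h2
                apply PySem.Dict.ext
                rw [PySem.Dict.items_insert_of_contains]
                · simp [pvShape]
                · simp [pvShape]
              · rw [if_neg h2]
                by_cases h3 : nk = "scan_depth"
                · rw [if_pos h3]
                  subst h3
                  apply PySem.Dict.ext
                  rw [PySem.Dict.items_insert_of_contains]
                  · simp [pvShape]
                  · simp [pvShape]
                · rw [if_neg h3]
                  apply pvShape_congr
                  intro k hk
                  have hnk : nk ≠ k := by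
                    simp [pvMetricKeys] at hk
                    rcases hk with rfl | rfl | rfl <;> assumption
                  simp [hnk]
  · rw [if_neg hin]
    simp only [if_neg hin]

lemma pvFirst_append (target : String) (l1 l2 : List String) :
    pvFirst target (l1 ++ l2)
      = match pvFirst target l1 with | some v => some v | none => pvFirst target l2 := by
  induction l1 with
  | nil => rfl
  | cons x xs ih =>
    simp only [List.cons_append, pvFirst]
    cases pvTryB target x <;> simp [ih]

lemma pvFold_shape (parts : List String) (f : String → Option Int) :
    parts.foldl pvStepA (pvShape f)
      = pvShape (fun k => match pvFirst k parts.reverse with | some v => some v | none => f k) := by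
  induction parts generalizing f with
  | nil => rfl
  | cons x xs ih =>
    simp only [List.foldl_cons, pvStep_shape, ih, List.reverse_cons]
    apply pvShape_congr
    intro k _
    rw [pvFirst_append]
    cases h : pvFirst k xs.reverse with
    | some v => simp
    | none =>
      simp only [pvFirst]
      cases pvTryB k x <;> rfl

-- ===== VERDICT (by name: the statement is the Claim_ definition above) =====
theorem parse_actionable_summary_metrics_spec : Claim_equal_parse_actionable_summary_metrics := by
  intro s _
  show parse_actionable_summary_metrics s = parse_actionable_summary_metrics_alt s
  unfold parse_actionable_summary_metrics parse_actionable_summary_metrics_alt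
  by_cases hs : s = ""
  · subst hs; decide
  · simp only [hs, if_false]
    have h0 : (PySem.Dict.ofList [("candidate_count", (none : Option Int)), ("scanned_nodes", none),
        ("scan_depth", none)]) = pvShape (fun _ => none) := by decide
    rw [h0, pvFold_shape]
    simp only [pvShape, pvMetricKeys, List.map]
    cases pvFirst "candidate_count" (((PySem.Str.split? s ";").getD []).reverse) <;>
      cases pvFirst "scanned_nodes" (((PySem.Str.split? s ";").getD []).reverse) <;>
        cases pvFirst "scan_depth" (((PySem.Str.split? s ";").getD []).reverse) <;> rfl
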